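-- pv_equiv track=rewrite | github.com/KRITHIKR007/SIH_ALPHA01 | src/dyslexia_platform/pipelines/tts_pipeline.py | _add_syllable_breaks
-- ===== SOURCE A (Python) =====
-- def _add_syllable_breaks(word: str) -> str:
--     """
--     Add syllable breaks to complex words.
--
--     Simple heuristic for syllable detection - in production,
--     would use a proper syllabification library.
--     """
--     vowels = "aeiouAEIOU"
--     processed = ""
--
--     for i, char in enumerate(word):
--         processed += char
--
--         # Add break after vowel if followed by consonant
--         if (char in vowels and
--             i < len(word) - 2 and
--             word[i + 1] not in vowels and
--             word[i + 2] in vowels):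
--             processed += "-"  # Syllable break marker
--
--     return processed
-- ===== SOURCE B (Python) =====
-- def _add_syllable_breaks(word: str) -> str:
--     """Build the result back-to-front: walk the word reversed, carrying the two
--     characters that FOLLOW the current one as state, so no index lookahead into
--     the word is needed."""
--     vowels = "aeiouAEIOU"
--     pieces = []
--     nxt = nxt2 = None
--     for ch in reversed(word):
--         if (ch in vowels and nxt is not None and nxt not in vowels
--                 and nxt2 is not None and nxt2 in vowels):
--             pieces.append(ch + "-")
--         else:
--             pieces.append(ch)
--         nxt, nxt2 = ch, nxt
--     return "".join(reversed(pieces))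
-- ===== Notes on version B (the rewrite author's own statement) =====
-- stated objective: alternative
-- what changed: B builds the output back-to-front: one reverse traversal carries the two following characters as explicit state, replacing A's forward enumerate loop with index lookaheads into the word.
import Mathlib
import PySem

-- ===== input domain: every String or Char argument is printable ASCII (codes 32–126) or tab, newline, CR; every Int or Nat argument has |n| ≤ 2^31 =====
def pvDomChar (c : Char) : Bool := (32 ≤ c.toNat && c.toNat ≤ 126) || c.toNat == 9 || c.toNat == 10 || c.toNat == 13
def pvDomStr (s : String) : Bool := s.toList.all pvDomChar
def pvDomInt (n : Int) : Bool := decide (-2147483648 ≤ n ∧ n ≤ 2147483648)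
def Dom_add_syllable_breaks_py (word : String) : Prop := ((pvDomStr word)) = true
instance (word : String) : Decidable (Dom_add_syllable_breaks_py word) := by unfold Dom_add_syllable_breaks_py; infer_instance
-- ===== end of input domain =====

-- B builds the output back-to-front: a reverse traversal carrying the two following
-- characters as state instead of A's forward loop with index lookaheads; same cost.

-- ===== PORT A =====
-- literal port of A: a fold over enumerate(word), appending each char and a '-' when the
-- vowel/consonant/vowel window test on the ORIGINAL word fires; word[i+1]/word[i+2] are in
-- range whenever the guard i < len-2 holds, so pyGetD with a dummy default is exact.
def add_syllable_breaks_py (word : String) : String :=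
  let vowels : List Char := "aeiouAEIOU".toList
  let cs : List Char := word.toList
  let processed : List Char :=
    (PySem.List.enumerate cs 0).foldl
      (fun (acc : List Char) (p : Int × Char) =>
        let acc := acc ++ [p.2]
        if vowels.contains p.2
            && decide (p.1 < (cs.length : Int) - 2)
            && !(vowels.contains (PySem.List.pyGetD cs (p.1 + 1) ' '))
            && vowels.contains (PySem.List.pyGetD cs (p.1 + 2) ' ')
        then acc ++ ['-'] else acc)
      []
  String.ofList processed

-- ===== PORT B =====
-- literal port of Source B: fold over reversed(word) (= cs.reverse) with state
-- (pieces, nxt, nxt2); 'x is None' is modelled by Option, appending the piece keeps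
-- Python's append order; ''.join(reversed(pieces)) = flatten of the reversed list.
def add_syllable_breaks_py_alt (word : String) : String :=
  let vowels : List Char := "aeiouAEIOU".toList
  let cs : List Char := word.toList
  let st :=
    cs.reverse.foldl
      (fun (s : List (List Char) × Option Char × Option Char) (ch : Char) =>
        let pieces :=
          if vowels.contains ch
              && (match s.2.1 with | some b => !(vowels.contains b) | none => false)
              && (match s.2.2 with | some c => vowels.contains c | none => false)
          then s.1 ++ [[ch, '-']] else s.1 ++ [[ch]]
        (pieces, some ch, s.2.1))
      ([], none, none)
  String.ofList st.1.reverse.flatten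

-- ===== PRECONDITION & SPEC =====
def Spec_add_syllable_breaks_py (word : String) (out : String) : Prop := out = add_syllable_breaks_py_alt word
instance (word : String) (out : String) : Decidable (Spec_add_syllable_breaks_py word out) := by unfold Spec_add_syllable_breaks_py; infer_instance

-- ===== CLAIM (what is proved, stated in full; the proofs are below) =====
def Claim_equal_add_syllable_breaks_py : Prop := ∀ (word : String), Dom_add_syllable_breaks_py word → Spec_add_syllable_breaks_py word (add_syllable_breaks_py word)

-- ===== LEMMAS AND PROOFS =====

-- common specification both ports reduce to
def pvVowel (c : Char) : Bool := ("aeiouAEIOU".toList).contains c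

def pvBspec : List Char → List Char
  | a :: b :: c :: r =>
      (if pvVowel a && !(pvVowel b) && pvVowel c then [a, '-'] else [a]) ++ pvBspec (b :: c :: r)
  | l => l

def pvPieces : List Char → List (List Char)
  | a :: b :: c :: r =>
      (if pvVowel a && !(pvVowel b) && pvVowel c then [a, '-'] else [a]) :: pvPieces (b :: c :: r)
  | l => l.map (fun a => [a])

theorem pvBspec_nil : pvBspec [] = [] := rfl
theorem pvBspec_one (a : Char) : pvBspec [a] = [a] := rfl
theorem pvBspec_two (a b : Char) : pvBspec [a, b] = [a, b] := rfl
theorem pvBspec_cons3 (a b c : Char) (r : List Char) :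
    pvBspec (a :: b :: c :: r) =
      (if pvVowel a && !(pvVowel b) && pvVowel c then [a, '-'] else [a]) ++ pvBspec (b :: c :: r) := rfl

theorem pvPieces_flatten : ∀ (l : List Char), (pvPieces l).flatten = pvBspec l
  | [] => rfl
  | [_] => rfl
  | [_, _] => rfl
  | a :: b :: c :: r => by
      rw [pvPieces, List.flatten_cons, pvPieces_flatten (b :: c :: r), pvBspec_cons3]

-- the step function of B's fold, named so the invariant lemma can talk about it
def pvStepB (s : List (List Char) × Option Char × Option Char) (ch : Char) :
    List (List Char) × Option Char × Option Char :=
  let pieces :=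
    if ("aeiouAEIOU".toList).contains ch
        && (match s.2.1 with | some b => !(("aeiouAEIOU".toList).contains b) | none => false)
        && (match s.2.2 with | some c => ("aeiouAEIOU".toList).contains c | none => false)
    then s.1 ++ [[ch, '-']] else s.1 ++ [[ch]]
  (pieces, some ch, s.2.1)

theorem pvIteApp {α : Type} (C : Prop) [Decidable C] (X : List α) (u v : α) :
    (if C then X ++ [u] else X ++ [v]) = X ++ [if C then u else v] := by split <;> rfl

theorem pvLoopB : ∀ (l : List Char),
    l.reverse.foldl pvStepB ([], none, none) = ((pvPieces l).reverse, l.head?, l[1]?) := by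
  intro l
  induction l with
  | nil => rfl
  | cons a rest IH =>
    rw [List.reverse_cons, List.foldl_append, IH, List.foldl_cons, List.foldl_nil]
    match rest with
    | [] => simp [pvStepB, pvPieces]
    | [b] =>
      simp only [pvStepB, pvPieces, List.head?, List.map]
      simp
    | b :: c :: r =>
      have hp : pvPieces (a :: b :: c :: r) =
          (if pvVowel a && !(pvVowel b) && pvVowel c then [a, '-'] else [a]) :: pvPieces (b :: c :: r) := rfl
      simp only [pvStepB, hp, List.reverse_cons, List.head?, List.getElem?_cons_zero,
        List.getElem?_cons_succ, pvVowel, Prod.mk.injEq]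
      exact ⟨pvIteApp _ _ _ _, trivial⟩

theorem pvLoopA (suf : List Char) : ∀ (i : Nat) (cs acc : List Char), cs.drop i = suf →
    (PySem.List.enumerate suf (i : Int)).foldl
      (fun (acc : List Char) (p : Int × Char) =>
        let acc := acc ++ [p.2]
        if pvVowel p.2
            && decide (p.1 < (cs.length : Int) - 2)
            && !(pvVowel (PySem.List.pyGetD cs (p.1 + 1) ' '))
            && pvVowel (PySem.List.pyGetD cs (p.1 + 2) ' ')
        then acc ++ ['-'] else acc)
      acc = acc ++ pvBspec suf := by
  induction suf with
  | nil => intro i cs acc h; rw [PySem.List.enumerate_nil, List.foldl_nil, pvBspec_nil, List.append_nil]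
  | cons a rest IH =>
    intro i cs acc h
    have hi : i < cs.length := by
      by_contra hle
      have : cs.drop i = [] := List.drop_eq_nil_of_le (by omega)
      simp [this] at h
    have hlen : cs.length = i + rest.length + 1 := by
      have := congrArg List.length h
      simp [List.length_drop] at this
      omega
    have hg1 : PySem.List.pyGetD cs ((i : Int) + 1) ' ' = rest.getD 0 ' ' := by
      have h1 : ((i : Int) + 1) = ((i + 1 : Nat) : Int) := by push_cast; ring
      rw [h1, PySem.List.pyGetD_natCast]
      have h2 : cs[i + 1]? = (a :: rest)[1]? := by
        rw [← h, List.getElem?_drop]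
      simp [List.getD, h2]
    have hg2 : PySem.List.pyGetD cs ((i : Int) + 2) ' ' = rest.getD 1 ' ' := by
      have h1 : ((i : Int) + 2) = ((i + 2 : Nat) : Int) := by push_cast; ring
      rw [h1, PySem.List.pyGetD_natCast]
      have h2 : cs[i + 2]? = (a :: rest)[2]? := by
        rw [← h, List.getElem?_drop]
      simp [List.getD, h2]
    have hrest : cs.drop (i + 1) = rest := by
      rw [← List.tail_drop, h, List.tail_cons]
    have hstep : ((i : Int) + 1) = ((i + 1 : Nat) : Int) := by push_cast; ring
    rw [PySem.List.enumerate_cons, List.foldl_cons]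
    dsimp only
    rw [hg1, hg2, hstep, IH (i + 1) cs _ hrest]
    match rest with
    | [] =>
      have hb : decide ((i : Int) < (cs.length : Int) - 2) = false := by
        simp at hlen ⊢; omega
      simp [hb, pvBspec_nil, pvBspec_one]
    | [b] =>
      have hb : decide ((i : Int) < (cs.length : Int) - 2) = false := by
        simp at hlen ⊢; omega
      simp [hb, pvBspec_one, pvBspec_two]
    | b :: c :: r =>
      have hb : decide ((i : Int) < (cs.length : Int) - 2) = true := by
        simp at hlen ⊢; omega
      rw [pvBspec_cons3]
      simp only [hb, List.getD, List.getElem?_cons_zero, List.getElem?_cons_succ, Option.getD_some,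
        Bool.and_true]
      by_cases hv : (pvVowel a && !(pvVowel b) && pvVowel c) = true <;>
        simp [hv, List.append_assoc]

-- ===== VERDICT (by name: the statement is the Claim_ definition above) =====
theorem add_syllable_breaks_py_spec : Claim_equal_add_syllable_breaks_py := by
  intro word _
  unfold Spec_add_syllable_breaks_py add_syllable_breaks_py add_syllable_breaks_py_alt
  refine congrArg String.ofList ?_
  have hA := pvLoopA word.toList 0 word.toList [] List.drop_zero
  have hB := pvLoopB word.toList
  simp only [pvVowel] at hA
  simp only [Nat.cast_zero] at hA
  rw [List.nil_append] at hA
  have h2 : ((List.foldl pvStepB ([], none, none) word.toList.reverse).1).reverse.flatten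
      = pvBspec word.toList := by
    rw [hB, List.reverse_reverse, pvPieces_flatten]
  exact hA.trans h2.symm
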